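-- pv_equiv track=rewrite | github.com/kjxlstad/AdventOfCode | 2024/22/solution.py | banana_yield
-- ===== SOURCE A (Python) =====
-- from collections import defaultdict
-- from itertools import accumulate, pairwise
-- from typing import Iterable
--
-- def evolve(secret: int, modulus: int = 0xFFFFFF + 1) -> int:
--     secret ^= (secret * 64) % modulus
--     secret ^= (secret // 32) % modulus
--     secret ^= (secret * 2048) % modulus
--     return secret % modulus
--
-- def generate_prices(secret: int, num_steps: int = 2000, modulus: int = 10) -> list[int]:
--     secrets = accumulate(range(num_steps), lambda s, _: evolve(s), initial=secret)
--     return [s % modulus for s in secrets]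
--
-- def banana_yield(numbers: list[int], seq_len: int = 4) -> Iterable[int]:
--     total_bananas = defaultdict(int)
--
--     for prices in map(generate_prices, numbers):
--         seen = set()
--         price_changes = [b - a for a, b in pairwise(prices)]
--         for i in range(len(prices) - seq_len):
--             if (price_change := tuple(price_changes[i : i + seq_len])) not in seen:
--                 seen |= {price_change}
--                 total_bananas[price_change] += prices[i + seq_len]
--
--     return total_bananas.values()
-- ===== SOURCE B (Python) =====
-- # B: fused single pass per buyer over the prices (sliding change window + per-buyer
-- # first-occurrence dict), then merge each buyer's dict into a global total in scan order;
-- # no price_changes list, no slicing, no 'seen' set.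
-- from itertools import accumulate
-- from typing import Iterable
--
--
-- def evolve(secret: int, modulus: int = 0xFFFFFF + 1) -> int:
--     secret ^= (secret * 64) % modulus
--     secret ^= (secret // 32) % modulus
--     secret ^= (secret * 2048) % modulus
--     return secret % modulus
--
--
-- def generate_prices(secret: int, num_steps: int = 2000, modulus: int = 10) -> list[int]:
--     secrets = accumulate(range(num_steps), lambda s, _: evolve(s), initial=secret)
--     return [s % modulus for s in secrets]
--
--
-- def banana_yield(numbers: list[int], seq_len: int = 4) -> Iterable[int]:
--     total = {}
--     for secret in numbers:
--         first = {}
--         window = []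
--         prev = None
--         for p in generate_prices(secret):
--             if prev is not None:
--                 window.append(p - prev)
--                 if len(window) > seq_len:
--                     window.pop(0)
--                 if len(window) == seq_len:
--                     first.setdefault(tuple(window), p)
--             prev = p
--         for seq, price in first.items():
--             total[seq] = total.get(seq, 0) + price
--     return total.values()
-- ===== Notes on version B (the rewrite author's own statement) =====
-- stated objective: alternative
-- what changed: Per buyer, B fuses price generation consumption into one streaming pass that maintains a sliding window of the last seq_len changes and a per-buyer first-occurrence dict (setdefault), then merges each buyer's dict into the global total in scan order, replacing A's materialised price_changes list, per-window slicing, 'seen' set and direct defaultdict increments.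
-- outside the precondition, e.g. on banana_yield([1], 0): A returns [1], B returns [3]; on banana_yield([1], -1): A returns [9, 1], B returns []; on banana_yield([1], -3000): A raises IndexError, B returns []
import Mathlib
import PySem

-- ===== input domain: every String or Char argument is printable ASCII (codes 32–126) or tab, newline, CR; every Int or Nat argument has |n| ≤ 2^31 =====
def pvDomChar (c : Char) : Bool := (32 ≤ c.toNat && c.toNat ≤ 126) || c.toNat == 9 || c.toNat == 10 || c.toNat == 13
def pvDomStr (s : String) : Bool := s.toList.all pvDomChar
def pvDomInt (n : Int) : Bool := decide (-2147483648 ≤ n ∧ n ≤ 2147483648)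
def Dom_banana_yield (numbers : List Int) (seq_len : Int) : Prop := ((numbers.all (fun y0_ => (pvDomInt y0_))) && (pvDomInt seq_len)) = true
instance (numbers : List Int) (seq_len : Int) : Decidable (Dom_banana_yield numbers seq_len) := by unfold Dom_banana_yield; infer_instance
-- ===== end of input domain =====

set_option maxRecDepth 40000

-- B replaces A's per-buyer (price_changes list + index loop + slices + 'seen' set + global
-- defaultdict increments) with one streaming pass per buyer (sliding change window,
-- per-buyer first-occurrence dict via setdefault) merged into the global total afterwards;
-- same cost, different decomposition ("alternative").

-- ===== PORT A =====
-- shared module helpers (identical source lines in Source A and Source B)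
def evolve (secret : Int) : Int :=
  let m : Int := 16777216
  let s1 := PySem.Int.bxor secret (PySem.Int.mod (secret * 64) m)
  let s2 := PySem.Int.bxor s1 (PySem.Int.mod (PySem.Int.floordiv s1 32) m)
  let s3 := PySem.Int.bxor s2 (PySem.Int.mod (s2 * 2048) m)
  PySem.Int.mod s3 m

-- accumulate(range(num_steps), λ s _, evolve s, initial=secret): secret and its num_steps evolutions
def genSecrets (secret : Int) : Nat → List Int
  | 0 => [secret]
  | n + 1 => secret :: genSecrets (evolve secret) n

def generate_prices (secret : Int) : List Int :=
  (genSecrets secret 2000).map (fun s => PySem.Int.mod s 10)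

-- the body of A's inner 'for i in range(len(prices) - seq_len)' loop
def stepA (changes prices : List Int) (seq_len : Int)
    (st : PySem.Set (List Int) × PySem.Dict (List Int) Int) (i : Int) :
    PySem.Set (List Int) × PySem.Dict (List Int) Int :=
  let pc := PySem.List.slice changes (some i) (some (i + seq_len))
  if st.1.contains pc then st
  else (st.1.add pc, st.2.modify pc 0 (fun b => b + PySem.List.pyGetD prices (i + seq_len) 0))

def banana_yield (numbers : List Int) (seq_len : Int) : List Int :=
  (numbers.foldl (fun total secret =>
      let prices := generate_prices secret
      let price_changes := List.zipWith (fun a b => b - a) prices prices.tail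
      ((PySem.List.pyRange 0 ((prices.length : Int) - seq_len) 1).foldl
        (stepA price_changes prices seq_len) (PySem.Set.empty, total)).2)
    PySem.Dict.empty).values

-- ===== PORT B =====
-- the body of B's streaming 'for p in generate_prices(secret)' loop
def stepB (seq_len : Int)
    (st : PySem.Dict (List Int) Int × List Int × Option Int) (p : Int) :
    PySem.Dict (List Int) Int × List Int × Option Int :=
  match st.2.2 with
  | none => (st.1, st.2.1, some p)
  | some q =>
    let w1 := st.2.1 ++ [p - q]
    let w2 := if (w1.length : Int) > seq_len then w1.tail else w1
    let first := if ((w2.length : Int) == seq_len) then st.1.setdefault w2 p else st.1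
    (first, w2, some p)

-- B's 'for seq, price in first.items(): total[seq] = total.get(seq, 0) + price'
def mergeInto (total first : PySem.Dict (List Int) Int) : PySem.Dict (List Int) Int :=
  first.items.foldl (fun t kv => t.insert kv.1 (t.getD kv.1 0 + kv.2)) total

def banana_yield_alt (numbers : List Int) (seq_len : Int) : List Int :=
  (numbers.foldl (fun total secret =>
      mergeInto total ((generate_prices secret).foldl (stepB seq_len) (PySem.Dict.empty, [], none)).1)
    PySem.Dict.empty).values

-- ===== PRECONDITION & SPEC =====
-- Pre_ restricts nonempty buyer lists to positive window lengths: for seq_len ≤ 0 the task has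
-- no meaning and A's returned values (an empty-tuple window at seq_len = 0, negative-slice and
-- negative-index wraparound for seq_len < 0, IndexError for seq_len ≤ -2002) are accidents of
-- Python indexing outside the natural domain; B's streaming loop never forms such windows.
def Pre_banana_yield (numbers : List Int) (seq_len : Int) : Prop :=
  numbers = [] ∨ 1 ≤ seq_len
instance (numbers : List Int) (seq_len : Int) : Decidable (Pre_banana_yield numbers seq_len) := by
  unfold Pre_banana_yield; infer_instance

def pvWitness_banana_yield : List Int × Int := ([1], 4)

def Spec_banana_yield (numbers : List Int) (seq_len : Int) (out : List Int) : Prop :=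
  out = banana_yield_alt numbers seq_len
instance (numbers : List Int) (seq_len : Int) (out : List Int) : Decidable (Spec_banana_yield numbers seq_len out) := by
  unfold Spec_banana_yield; infer_instance

-- ===== CLAIM (what is proved, stated in full; the proofs are below) =====
def Claim_equal_banana_yield : Prop := ∀ (numbers : List Int) (seq_len : Int), Dom_banana_yield numbers seq_len → Pre_banana_yield numbers seq_len → Spec_banana_yield numbers seq_len (banana_yield numbers seq_len)

-- ===== LEMMAS AND PROOFS =====

-- B's inner fold with prev = some q is a fold over (change, new-price) pairs
def stepC (seq_len : Int) (st : PySem.Dict (List Int) Int × List Int) (cp : Int × Int) :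
    PySem.Dict (List Int) Int × List Int :=
  let w1 := st.2 ++ [cp.1]
  let w2 := if (w1.length : Int) > seq_len then w1.tail else w1
  ((if ((w2.length : Int) == seq_len) then st.1.setdefault w2 cp.2 else st.1), w2)

-- midpoint: forward setdefault fold over window start indices
def sdStep (changes prices : List Int) (seq_len : Int)
    (d : PySem.Dict (List Int) Int) (j : Int) : PySem.Dict (List Int) Int :=
  d.setdefault (PySem.List.slice changes (some j) (some (j + seq_len)))
    (PySem.List.pyGetD prices (j + seq_len) 0)

theorem pairify (seq_len : Int) (ps : List Int) :
    ∀ (q : Int) (first : PySem.Dict (List Int) Int) (window : List Int),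
    (ps.foldl (stepB seq_len) (first, window, some q)).1 =
      ((List.zipWith (fun a b => (b - a, b)) (q :: ps) ps).foldl (stepC seq_len) (first, window)).1 := by
  induction ps with
  | nil => intro q first window; rfl
  | cons p ps ih =>
    intro q first window
    simp only [List.zipWith_cons_cons, List.foldl_cons]
    exact ih p (stepC seq_len (first, window) (p - q, p)).1 (stepC seq_len (first, window) (p - q, p)).2

-- streaming core: stepC over pairs P = setdefault fold over full-window start indices,
-- window = last min(|P|, seq_len) changes
theorem slice_agree (cs zs : List Int) (L j : Int) (hj : 0 ≤ j) (hL : 1 ≤ L)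
    (hle : j + L ≤ (cs.length : Int)) :
    PySem.List.slice (cs ++ zs) (some j) (some (j + L)) =
      PySem.List.slice cs (some j) (some (j + L)) := by
  rw [PySem.List.slice_toNat _ hj (by omega), PySem.List.slice_toNat _ hj (by omega)]
  rw [List.drop_append_of_le_length (by omega)]
  exact List.take_append_of_le_length (by simp; omega)

theorem slice_tailwindow (cs : List Int) (L : Int) (hL : 1 ≤ L) (hle : L ≤ (cs.length : Int)) :
    PySem.List.slice cs (some ((cs.length : Int) - L)) (some ((cs.length : Int) - L + L)) =
      cs.drop (cs.length - L.toNat) := by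
  rw [PySem.List.slice_toNat _ (by omega) (by omega)]
  have h1 : ((cs.length : Int) - L).toNat = cs.length - L.toNat := by omega
  have h2 : ((cs.length : Int) - L + L).toNat - ((cs.length : Int) - L).toNat = L.toNat := by omega
  rw [h2, h1]
  exact List.take_of_length_le (by simp; omega)

theorem getD_agree (x : Int) (ys zs : List Int) (i : Int) (h0 : 0 ≤ i)
    (hi : i < (ys.length : Int) + 1) :
    PySem.List.pyGetD (x :: (ys ++ zs)) i 0 = PySem.List.pyGetD (x :: ys) i 0 := by
  rw [show x :: (ys ++ zs) = (x :: ys) ++ zs by simp]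
  rw [PySem.List.pyGetD_eq_getElem _ _ h0 (by simp only [List.length_append, List.length_cons]; omega),
    PySem.List.pyGetD_eq_getElem _ _ h0 (by simp only [List.length_cons]; omega)]
  exact List.getElem_append_left (by simp only [List.length_cons]; omega)

theorem getD_last (x : Int) (ys : List Int) (p : Int) :
    PySem.List.pyGetD (x :: (ys ++ [p])) ((ys.length : Int) + 1) 0 = p := by
  rw [show x :: (ys ++ [p]) = (x :: ys) ++ [p] by simp]
  rw [PySem.List.pyGetD_eq_getElem _ _ (by omega)
    (by simp only [List.length_append, List.length_cons, List.length_nil]; omega)]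
  rw [List.getElem_append_right (by simp)]
  simp

theorem stream (L : Int) (hL : 1 ≤ L) (P : List (Int × Int)) :
    ∀ (first : PySem.Dict (List Int) Int),
    P.foldl (stepC L) (first, []) =
      ((PySem.List.pyRange 0 ((P.length : Int) + 1 - L) 1).foldl
          (sdStep (P.map (·.1)) (0 :: P.map (·.2)) L) first,
        (P.map (·.1)).drop (P.length - L.toNat)) := by
  have hLt : (L.toNat : Int) = L := Int.toNat_of_nonneg (by omega)
  induction P using List.reverseRecOn with
  | nil =>
    intro first
    rw [show ((([] : List (Int × Int)).length : Int) + 1 - L) = 0 + (1 - L) by simp]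
    rw [PySem.List.pyRange_one_eq_nil (by omega)]
    simp
  | append_singleton P x ih =>
    obtain ⟨c, p⟩ := x
    intro first
    rw [List.foldl_append, ih first]
    simp only [List.foldl_cons, List.foldl_nil, List.map_append, List.map_cons, List.map_nil,
      List.length_append, List.length_cons, List.length_nil, zero_add, Nat.cast_add, Nat.cast_one]
    set n := P.length with hn
    set cs := P.map (·.1) with hcs
    set ys := P.map (·.2) with hys
    have hcsl : cs.length = n := by simp [hcs, hn]
    have hysl : ys.length = n := by simp [hys, hn]
    by_cases hge : L.toNat ≤ n
    · -- window already full: pop the head, append the new window index at the right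
      have hWlen : (cs.drop (n - L.toNat)).length = L.toNat := by simp [hcsl]; omega
      have hw2 : (cs.drop (n - L.toNat) ++ [c]).tail = (cs ++ [c]).drop (n + 1 - L.toNat) := by
        rw [List.tail_append_of_ne_nil (by intro h; rw [h] at hWlen; simp at hWlen; omega)]
        rw [List.tail_drop, List.drop_append_of_le_length (by omega)]
        rw [show n - L.toNat + 1 = n + 1 - L.toNat by omega]
      have hw2len : ((cs ++ [c]).drop (n + 1 - L.toNat)).length = L.toNat := by
        simp [hcsl]; omega
      have hstep : stepC L (((PySem.List.pyRange 0 ((n : Int) + 1 - L) 1).foldl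
            (sdStep cs (0 :: ys) L) first), cs.drop (n - L.toNat)) (c, p) =
          (((PySem.List.pyRange 0 ((n : Int) + 1 - L) 1).foldl (sdStep cs (0 :: ys) L)
              first).setdefault ((cs ++ [c]).drop (n + 1 - L.toNat)) p,
            (cs ++ [c]).drop (n + 1 - L.toNat)) := by
        simp only [stepC]
        rw [hw2]
        split_ifs with h1 h2 h3
        · rfl
        · exfalso; rw [hw2len] at h2; simp [hLt] at h2
        · exfalso
          simp only [List.length_append, List.length_cons, List.length_nil, hWlen] at h1; omega
        · exfalso
          simp only [List.length_append, List.length_cons, List.length_nil, hWlen] at h1; omega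
      rw [hstep]
      rw [show ((n : Int) + 1 + 1 - L) = ((n : Int) + 1 - L) + 1 by ring]
      rw [PySem.List.pyRange_one_succ_right (by omega)]
      rw [List.foldl_append, List.foldl_cons, List.foldl_nil]
      have hcongr : (PySem.List.pyRange 0 ((n : Int) + 1 - L) 1).foldl
            (sdStep (cs ++ [c]) (0 :: (ys ++ [p])) L) first =
          (PySem.List.pyRange 0 ((n : Int) + 1 - L) 1).foldl (sdStep cs (0 :: ys) L) first := by
        apply PySem.List.foldl_congr_mem
        intro acc j hj
        rw [PySem.List.mem_pyRange_one] at hj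
        unfold sdStep
        rw [slice_agree cs [c] L j hj.1 hL (by omega)]
        rw [getD_agree 0 ys [p] (j + L) (by omega) (by omega)]
      rw [hcongr]
      congr 1
      unfold sdStep
      have hkey : PySem.List.slice (cs ++ [c]) (some ((n : Int) + 1 - L))
            (some ((n : Int) + 1 - L + L)) = (cs ++ [c]).drop (n + 1 - L.toNat) := by
        have := slice_tailwindow (cs ++ [c]) L hL (by simp [hcsl]; omega)
        simpa [hcsl] using this
      rw [hkey]
      rw [show (n : Int) + 1 - L + L = ((ys.length : Int) + 1) by rw [hysl]; ring]
      rw [getD_last]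
    · -- window not yet full: it just grows
      have hnd : n - L.toNat = 0 := by omega
      have hdropz : cs.drop (n - L.toNat) = cs := by rw [hnd]; rfl
      by_cases heq : n + 1 = L.toNat
      · -- the window becomes full for the first time: a single index 0 appears
        have hstep : stepC L (((PySem.List.pyRange 0 ((n : Int) + 1 - L) 1).foldl
              (sdStep cs (0 :: ys) L) first), cs.drop (n - L.toNat)) (c, p) =
            (((PySem.List.pyRange 0 ((n : Int) + 1 - L) 1).foldl (sdStep cs (0 :: ys) L)
                first).setdefault (cs ++ [c]) p, cs ++ [c]) := by
          simp only [stepC, hdropz]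
          split_ifs with h1 h2 h3
          · exfalso
            simp only [List.length_append, List.length_cons, List.length_nil, hcsl] at h1; omega
          · exfalso
            simp only [List.length_append, List.length_cons, List.length_nil, hcsl] at h1; omega
          · rfl
          · exfalso
            simp only [List.length_append, List.length_cons, List.length_nil, hcsl,
              beq_iff_eq] at h3
            omega
        rw [hstep]
        rw [PySem.List.pyRange_one_eq_nil (a := 0) (b := (n : Int) + 1 - L) (by omega)]
        rw [show ((n : Int) + 1 + 1 - L) = 0 + 1 by omega]
        rw [PySem.List.pyRange_one_singleton]
        simp only [List.foldl_cons, List.foldl_nil]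
        unfold sdStep
        have hkey : PySem.List.slice (cs ++ [c]) (some 0) (some (0 + L)) = cs ++ [c] := by
          rw [PySem.List.slice_toNat _ (by omega) (by omega), zero_add, Int.toNat_zero,
            Nat.sub_zero, List.drop_zero]
          exact List.take_of_length_le
            (by simp only [List.length_append, List.length_cons, List.length_nil, hcsl]; omega)
        rw [hkey]
        rw [show (0 : Int) + L = ((ys.length : Int) + 1) by rw [hysl]; omega]
        rw [getD_last]
        rw [show n + 1 - L.toNat = 0 by omega, List.drop_zero]
      · -- still not full: nothing recorded on either side
        have hstep : stepC L (((PySem.List.pyRange 0 ((n : Int) + 1 - L) 1).foldl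
              (sdStep cs (0 :: ys) L) first), cs.drop (n - L.toNat)) (c, p) =
            (((PySem.List.pyRange 0 ((n : Int) + 1 - L) 1).foldl (sdStep cs (0 :: ys) L)
                first), cs ++ [c]) := by
          simp only [stepC, hdropz]
          split_ifs with h1 h2 h3
          · exfalso
            simp only [List.length_append, List.length_cons, List.length_nil, hcsl] at h1; omega
          · exfalso
            simp only [List.length_append, List.length_cons, List.length_nil, hcsl] at h1; omega
          · exfalso
            simp only [List.length_append, List.length_cons, List.length_nil, hcsl,
              beq_iff_eq] at h3
            omega
          · rfl
        rw [hstep]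
        rw [PySem.List.pyRange_one_eq_nil (a := 0) (b := (n : Int) + 1 - L) (by omega),
          PySem.List.pyRange_one_eq_nil (a := 0) (b := (n : Int) + 1 + 1 - L) (by omega)]
        simp only [List.foldl_nil]
        rw [show n + 1 - L.toNat = 0 by omega]
        simp

-- A's seen-set loop folded from (Set.empty, mergeInto total d) with seen = d.keys
theorem contains_iff (d : PySem.Dict (List Int) Int) (k : List Int) :
    PySem.Dict.contains d k = true ↔ k ∈ d.keys := by
  simp only [PySem.Dict.contains, PySem.Dict.keys, List.any_eq_true, List.mem_map, beq_iff_eq]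

theorem keys_contains (d : PySem.Dict (List Int) Int) (k : List Int) :
    PySem.Set.contains (PySem.Dict.keys d) k = PySem.Dict.contains d k := by
  rw [Bool.eq_iff_iff]
  simp [PySem.Set.contains, contains_iff d k]

theorem mergeInto_append (total d : PySem.Dict (List Int) Int) (k : List Int) (v : Int) :
    mergeInto total ⟨d.items ++ [(k, v)]⟩ =
      (mergeInto total d).insert k ((mergeInto total d).getD k 0 + v) := by
  simp [mergeInto, List.foldl_append]

theorem aside (changes prices : List Int) (seq_len : Int) (l : List Int) :
    ∀ (total d : PySem.Dict (List Int) Int),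
    (l.foldl (stepA changes prices seq_len) (d.keys, mergeInto total d)).2 =
      mergeInto total (l.foldl (sdStep changes prices seq_len) d) := by
  induction l with
  | nil => intro total d; rfl
  | cons i l ih =>
    intro total d
    simp only [List.foldl_cons]
    rcases hc : PySem.Dict.contains d (PySem.List.slice changes (some i) (some (i + seq_len))) with _ | _
    · have hstep : stepA changes prices seq_len (d.keys, mergeInto total d) i =
          ((PySem.Dict.setdefault d (PySem.List.slice changes (some i) (some (i + seq_len)))
              (PySem.List.pyGetD prices (i + seq_len) 0)).keys,
            mergeInto total (PySem.Dict.setdefault d (PySem.List.slice changes (some i) (some (i + seq_len)))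
              (PySem.List.pyGetD prices (i + seq_len) 0))) := by
        simp only [stepA, keys_contains, hc, Bool.false_eq_true, if_false, PySem.Dict.setdefault,
          PySem.Set.add, PySem.Dict.modify]
        rw [mergeInto_append]
        simp [PySem.Dict.keys]
      rw [hstep, sdStep]
      exact ih total _
    · have hmem := (contains_iff d _).mp hc
      have hstep : stepA changes prices seq_len (d.keys, mergeInto total d) i = (d.keys, mergeInto total d) := by
        simp [stepA, PySem.Set.contains, hmem]
      rw [hstep, sdStep, PySem.Dict.setdefault, if_pos hc]
      exact ih total d

theorem zip_snd (ps : List Int) : ∀ (q : Int),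
    (List.zipWith (fun a b => (b - a, b)) (q :: ps) ps).map (·.2) = ps := by
  induction ps with
  | nil => intro q; rfl
  | cons p ps ih => intro q; simp only [List.zipWith_cons_cons, List.map_cons, ih p]

theorem zip_len (ps : List Int) (q : Int) :
    (List.zipWith (fun a b => (b - a, b)) (q :: ps) ps).length = ps.length := by
  simp only [List.length_zipWith, List.length_cons]
  omega

theorem getD_cons_irrel (x y : Int) (ys : List Int) (i : Int) (h1 : 1 ≤ i)
    (h2 : i < (ys.length : Int) + 1) :
    PySem.List.pyGetD (x :: ys) i 0 = PySem.List.pyGetD (y :: ys) i 0 := by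
  rw [PySem.List.pyGetD_eq_getElem _ _ (by omega) (by simp only [List.length_cons]; omega),
    PySem.List.pyGetD_eq_getElem _ _ (by omega) (by simp only [List.length_cons]; omega)]
  obtain ⟨k, hk⟩ : ∃ k, i.toNat = k + 1 := ⟨i.toNat - 1, by omega⟩
  simp only [hk, List.getElem_cons_succ]

theorem buyer_eq (seq_len : Int) (hL : 1 ≤ seq_len) (prices : List Int)
    (total : PySem.Dict (List Int) Int) :
    ((PySem.List.pyRange 0 ((prices.length : Int) - seq_len) 1).foldl
        (stepA (List.zipWith (fun a b => b - a) prices prices.tail) prices seq_len)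
        (PySem.Set.empty, total)).2 =
      mergeInto total (prices.foldl (stepB seq_len) (PySem.Dict.empty, [], none)).1 := by
  cases prices with
  | nil =>
    rw [show ((([] : List Int).length : Int) - seq_len) = 0 + (0 - seq_len) by simp]
    rw [PySem.List.pyRange_one_eq_nil (by omega)]
    rfl
  | cons p0 ps =>
    -- B side: peel the first price (prev = None), pair up, apply the streaming lemma
    simp only [List.foldl_cons]
    rw [show stepB seq_len (PySem.Dict.empty, [], none) p0
        = (PySem.Dict.empty, [], some p0) from rfl]
    rw [pairify seq_len ps p0 PySem.Dict.empty []]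
    rw [stream seq_len hL (List.zipWith (fun a b => (b - a, b)) (p0 :: ps) ps) PySem.Dict.empty]
    -- A side: replace the seen-set loop by the setdefault loop
    rw [show ((PySem.Set.empty : PySem.Set (List Int)), total)
        = ((PySem.Dict.empty : PySem.Dict (List Int) Int).keys,
            mergeInto total PySem.Dict.empty) from rfl]
    rw [aside]
    -- both are mergeInto of a setdefault fold; align lists and bounds
    rw [List.map_zipWith, zip_snd ps p0, zip_len ps p0]
    congr 1
    rw [show (((p0 :: ps).length : Int) - seq_len) = ((ps.length : Int) + 1 - seq_len) by
      simp only [List.length_cons]; push_cast; ring]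
    apply PySem.List.foldl_congr_mem
    intro acc j hj
    rw [PySem.List.mem_pyRange_one] at hj
    unfold sdStep
    rw [show List.zipWith (fun a b => b - a) (p0 :: ps) ((p0 :: ps).tail)
        = List.zipWith (fun a b => b - a) (p0 :: ps) ps from rfl]
    rw [getD_cons_irrel p0 0 ps (j + seq_len) (by omega) (by omega)]

-- ===== VERDICT (by name: the statement is the Claim_ definition above) =====
theorem numbers_fold (seq_len : Int) (hL : 1 ≤ seq_len) (ns : List Int) :
    ∀ (t : PySem.Dict (List Int) Int),
    ns.foldl (fun total secret =>
        ((PySem.List.pyRange 0 (((generate_prices secret).length : Int) - seq_len) 1).foldl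
          (stepA (List.zipWith (fun a b => b - a) (generate_prices secret) (generate_prices secret).tail)
            (generate_prices secret) seq_len) (PySem.Set.empty, total)).2) t =
      ns.foldl (fun total secret =>
        mergeInto total ((generate_prices secret).foldl (stepB seq_len) (PySem.Dict.empty, [], none)).1) t := by
  induction ns with
  | nil => intro t; rfl
  | cons x xs ih =>
    intro t
    simp only [List.foldl_cons]
    rw [buyer_eq seq_len hL (generate_prices x) t]
    exact ih _

theorem banana_yield_spec : Claim_equal_banana_yield := by
  intro numbers seq_len _ hpre
  unfold Spec_banana_yield banana_yield banana_yield_alt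
  rcases hpre with h | h
  · subst h; rfl
  · exact congrArg PySem.Dict.values (numbers_fold seq_len h numbers PySem.Dict.empty)
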